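-- pv_equiv track=rewrite | github.com/ark2016/VK-Technopark-project-2024 | data_mining/tests/functions/file_1081_1100.py | subtract_lists_with_index
-- ===== SOURCE A (Python) =====
-- def subtract_lists_with_index(lst1, lst2):
--     result = []
--     for i in range(len(lst1)):
--         if i < len(lst2):
--             result.append((lst1[i] - lst2[i]) * i)
--         else:
--             result.append(lst1[i] * i)
--     if not result:
--         return None
--     return result
-- ===== SOURCE B (Python) =====
-- def subtract_lists_with_index(lst1, lst2):
--     # By distributivity (a - b) * i == a*i - b*i: scale lst1 by index first,
--     # then subtract the index-scaled overlap of lst2 in place.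
--     result = [x * i for i, x in enumerate(lst1)]
--     for i, y in enumerate(lst2[:len(lst1)]):
--         result[i] -= y * i
--     return result if result else None
-- ===== Notes on version B (the rewrite author's own statement) =====
-- stated objective: alternative
-- what changed: Uses distributivity (a-b)*i = a*i - b*i: B first builds the whole index-scaled lst1, then a second pass subtracts the index-scaled overlap of lst2 in place, instead of A's single index loop that branches per element on i < len(lst2).
import Mathlib
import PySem

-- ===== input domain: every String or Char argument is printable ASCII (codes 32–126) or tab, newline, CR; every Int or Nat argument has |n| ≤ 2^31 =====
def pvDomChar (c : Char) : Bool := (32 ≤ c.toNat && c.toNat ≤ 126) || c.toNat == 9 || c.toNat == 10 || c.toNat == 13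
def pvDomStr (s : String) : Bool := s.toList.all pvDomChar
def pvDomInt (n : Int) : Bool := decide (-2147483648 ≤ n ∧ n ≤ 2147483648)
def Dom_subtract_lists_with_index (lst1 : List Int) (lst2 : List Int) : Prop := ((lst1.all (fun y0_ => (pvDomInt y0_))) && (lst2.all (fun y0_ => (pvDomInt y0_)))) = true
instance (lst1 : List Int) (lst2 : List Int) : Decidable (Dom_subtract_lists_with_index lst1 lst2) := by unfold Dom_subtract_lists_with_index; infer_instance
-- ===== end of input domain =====

-- B uses distributivity (a-b)*i = a*i - b*i: it first builds the whole index-scaled lst1, then a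
-- second in-place pass subtracts the index-scaled overlap of lst2, instead of A's single branching
-- index loop; objective: alternative (same cost, different algorithmic decomposition).


-- ===== PORT A =====
def subtract_lists_with_index (lst1 : List Int) (lst2 : List Int) : Option (List Int) :=
  let result := (PySem.List.pyRange 0 (lst1.length : Int) 1).foldl
    (fun result i =>
      if i < (lst2.length : Int) then
        result ++ [(PySem.List.pyGetD lst1 i 0 - PySem.List.pyGetD lst2 i 0) * i]
      else
        result ++ [PySem.List.pyGetD lst1 i 0 * i]) []
  if result = [] then none else some result

-- ===== PORT B =====
def subtract_lists_with_index_alt (lst1 : List Int) (lst2 : List Int) : Option (List Int) :=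
  -- result = [x * i for i, x in enumerate(lst1)]
  let result := (PySem.List.enumerate lst1 0).map (fun p => p.2 * p.1)
  -- for i, y in enumerate(lst2[:len(lst1)]): result[i] -= y * i
  -- (i is always a valid index of result, so Python's result[i] read/write never raises;
  --  pyGetD/pySetD are exact here)
  let result := (PySem.List.enumerate (PySem.List.slice lst2 none (some (lst1.length : Int))) 0).foldl
    (fun r p => PySem.List.pySetD r p.1 (PySem.List.pyGetD r p.1 0 - p.2 * p.1)) result
  if result = [] then none else some result

-- ===== PRECONDITION & SPEC =====
def Spec_subtract_lists_with_index (lst1 : List Int) (lst2 : List Int) (out : Option (List Int)) : Prop := out = subtract_lists_with_index_alt lst1 lst2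
instance (lst1 : List Int) (lst2 : List Int) (out : Option (List Int)) : Decidable (Spec_subtract_lists_with_index lst1 lst2 out) := by unfold Spec_subtract_lists_with_index; infer_instance

-- ===== CLAIM (what is proved, stated in full; the proofs are below) =====
def Claim_equal_subtract_lists_with_index : Prop := ∀ (lst1 : List Int) (lst2 : List Int), Dom_subtract_lists_with_index lst1 lst2 → Spec_subtract_lists_with_index lst1 lst2 (subtract_lists_with_index lst1 lst2)

-- ===== LEMMAS AND PROOFS =====

theorem getElem_enum_zero {α : Type} (xs : List α) (s : Int) (k : Nat) (h : k < xs.length) :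
    (PySem.List.enumerate xs s)[k]'(by simpa [PySem.List.length_enumerate] using h) = (s + k, xs[k]) := by
  induction xs generalizing s k with
  | nil => simp at h
  | cons x xs ih =>
    simp only [PySem.List.enumerate_cons]
    cases k with
    | zero => simp
    | succ k =>
      have hk : k < xs.length := by simpa using h
      simp only [List.getElem_cons_succ]
      rw [ih (s + 1) k hk]
      simp; ring_nf

-- B's in-place loop: length is preserved.
theorem bLoop_length (ys r : List Int) (s : Int) :
    ((PySem.List.enumerate ys s).foldl
      (fun r p => PySem.List.pySetD r p.1 (PySem.List.pyGetD r p.1 0 - p.2 * p.1)) r).length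
    = r.length := by
  induction ys generalizing s r with
  | nil => simp [PySem.List.enumerate]
  | cons y ys ih =>
    simp only [PySem.List.enumerate_cons, List.foldl_cons]
    rw [ih]
    simp [PySem.List.length_pySetD]

-- B's in-place loop: element characterisation (each index s ≤ k < s + len(ys) is set once).
theorem bLoop_getD (ys : List Int) (r : List Int) (s : Nat)
    (h : s + ys.length ≤ r.length) (k : Nat) :
    ((PySem.List.enumerate ys (s : Int)).foldl
      (fun r p => PySem.List.pySetD r p.1 (PySem.List.pyGetD r p.1 0 - p.2 * p.1)) r).getD k 0
    = if s ≤ k ∧ k < s + ys.length then r.getD k 0 - ys.getD (k - s) 0 * (k : Int)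
      else r.getD k 0 := by
  induction ys generalizing s r with
  | nil => simp [PySem.List.enumerate]
  | cons y ys ih =>
    have hs : s < r.length := by simp at h; omega
    simp only [PySem.List.enumerate_cons, List.foldl_cons]
    have hcast : (s : Int) + 1 = ((s + 1 : Nat) : Int) := by push_cast; ring
    rw [PySem.List.pySetD_natCast, PySem.List.pyGetD_natCast, hcast,
        ih (r.set s (r.getD s 0 - y * s)) (s + 1)
          (by simp only [List.length_cons, List.length_set] at h ⊢; omega)]
    by_cases hk : k = s
    · subst hk
      rw [if_neg (by omega), if_pos (by simp only [List.length_cons]; omega)]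
      simp [List.getD, hs]
    · have hk' : s ≠ k := Ne.symm hk
      have hset : (r.set s (r.getD s 0 - y * s)).getD k 0 = r.getD k 0 := by
        simp [List.getD, hk']
      rw [hset]
      by_cases hrange : s ≤ k ∧ k < s + (y :: ys).length
      · have hks : s + 1 ≤ k := by omega
        rw [if_pos (by simp only [List.length_cons] at hrange ⊢; omega), if_pos hrange]
        have : k - s = (k - (s + 1)) + 1 := by omega
        rw [this]
        simp
      · rw [if_neg (by simp only [List.length_cons] at hrange ⊢; omega), if_neg hrange]

-- The two result lists are equal.
theorem result_eq (lst1 lst2 : List Int) :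
    (PySem.List.pyRange 0 (lst1.length : Int) 1).foldl
      (fun result i =>
        if i < (lst2.length : Int) then
          result ++ [(PySem.List.pyGetD lst1 i 0 - PySem.List.pyGetD lst2 i 0) * i]
        else
          result ++ [PySem.List.pyGetD lst1 i 0 * i]) []
    = (PySem.List.enumerate (PySem.List.slice lst2 none (some (lst1.length : Int))) 0).foldl
        (fun r p => PySem.List.pySetD r p.1 (PySem.List.pyGetD r p.1 0 - p.2 * p.1))
        ((PySem.List.enumerate lst1 0).map (fun p => p.2 * p.1)) := by
  have hstep : (fun (result : List Int) (i : Int) =>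
      if i < (lst2.length : Int) then
        result ++ [(PySem.List.pyGetD lst1 i 0 - PySem.List.pyGetD lst2 i 0) * i]
      else
        result ++ [PySem.List.pyGetD lst1 i 0 * i])
      = fun result i => result ++ [if i < (lst2.length : Int) then
          (PySem.List.pyGetD lst1 i 0 - PySem.List.pyGetD lst2 i 0) * i
        else PySem.List.pyGetD lst1 i 0 * i] := by
    funext result i; split <;> rfl
  rw [hstep, PySem.List.foldl_append_singleton_eq_map, List.nil_append,
      PySem.List.slice_to_natCast]
  have hr0len : ((PySem.List.enumerate lst1 0).map (fun p : Int × Int => p.2 * p.1)).length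
      = lst1.length := by simp [PySem.List.length_enumerate]
  have hlen2 : (lst2.take lst1.length).length = min lst1.length lst2.length := by
    simp
  apply List.ext_getElem
  · rw [bLoop_length]
    simp [PySem.List.length_pyRange_one, hr0len]
  · intro k h1 h2
    have hk1 : k < lst1.length := by
      simpa [PySem.List.length_pyRange_one] using h1
    have hr0 : ∀ (j : Nat) (hj : j < lst1.length),
        ((PySem.List.enumerate lst1 0).map (fun p : Int × Int => p.2 * p.1)).getD j 0
        = lst1[j]'hj * j := by
      intro j hj
      rw [List.getD_eq_getElem _ _ (by rw [hr0len]; exact hj)]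
      simp only [List.getElem_map]
      rw [getElem_enum_zero lst1 0 j hj]
      simp
    have hB := bLoop_getD (lst2.take lst1.length)
      ((PySem.List.enumerate lst1 0).map (fun p : Int × Int => p.2 * p.1)) 0
      (by rw [hr0len, hlen2]; omega) k
    simp only [Nat.cast_zero] at hB
    rw [List.getElem_map, PySem.List.getElem_pyRange_one, zero_add,
        ← List.getD_eq_getElem _ 0 h2, hB]
    by_cases hk2 : k < lst2.length
    · rw [if_pos (show (k : Int) < (lst2.length : Int) from by exact_mod_cast hk2)]
      rw [if_pos (show 0 ≤ k ∧ k < 0 + (lst2.take lst1.length).length from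
            ⟨Nat.zero_le k, by rw [Nat.zero_add, hlen2]; omega⟩),
          hr0 k hk1, Nat.sub_zero,
          List.getD_eq_getElem _ _ (by rw [hlen2]; omega : k < (lst2.take lst1.length).length),
          List.getElem_take,
          PySem.List.pyGetD_eq_getElem lst1 0 (by positivity) (by exact_mod_cast hk1),
          PySem.List.pyGetD_eq_getElem lst2 0 (by positivity) (by exact_mod_cast hk2)]
      simp; ring
    · rw [if_neg (show ¬ (k : Int) < (lst2.length : Int) from by exact_mod_cast hk2)]
      rw [if_neg (show ¬ (0 ≤ k ∧ k < 0 + (lst2.take lst1.length).length) from by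
            simp only [Nat.zero_add, hlen2]; omega),
          hr0 k hk1,
          PySem.List.pyGetD_eq_getElem lst1 0 (by positivity) (by exact_mod_cast hk1)]
      simp

-- ===== VERDICT (by name: the statement is the Claim_ definition above) =====
theorem subtract_lists_with_index_spec : Claim_equal_subtract_lists_with_index := by
  intro lst1 lst2 _
  unfold Spec_subtract_lists_with_index subtract_lists_with_index subtract_lists_with_index_alt
  simp only [result_eq]
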